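-- pv_equiv track=rewrite | github.com/kimeunh3/codingtest-study1 | Hosan_Lee/프로그래머스/사이클.py | solution
-- ===== SOURCE A (Python) =====
-- def solution(grid):
--
--     direction = [[-1, 0], [1, 0], [0, 1], [0, -1]] # 왼 오른 아래 위, 첫번째 인덱스는 y좌표, 두번째 인덱스는 x좌표
--
--     right = {0: 3, 1: 2, 2: 0, 3: 1}
--     left = {0: 2, 1: 3, 2: 1, 3: 0}
--     answer = []
--     width, height = len(grid[0]), len(grid) # 가로 길이 'RL' 이라면 2, 세로 길이 원소의 개수
--
--     possibility = [[[1] * 4 for _ in range(width)] for _ in range(height)]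
--     for y in range(height):
--         for x in range(width):
--             for i in range(4):
--                 if possibility[y][x][i] == 0:
--                     continue
--                 cnt = 0  # 사이클의 길이
--                 curr_y, curr_x, curr_i = y, x, i
--                 while True:
--                     possibility[curr_y][curr_x][curr_i] -= 1
--                     cnt += 1
--                     curr_alphabet = grid[curr_y][curr_x] # 알파벳을 확인한다.
--
--                     if curr_alphabet == 'R':
--                         curr_i = right[curr_i]
--                     elif curr_alphabet == 'L':
--                         curr_i = left[curr_i]
--                     curr_x, curr_y = (curr_x + direction[curr_i][1]) % width, (curr_y + direction[curr_i][0]) % height #width, height 로 나눠주는 이유 : 끝에 갔다면 처음으로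
--                     # 처음 출발점에 왔다면 break 후 다음 탐색
--                     if curr_x == x and curr_y == y and curr_i == i:
--                         break
--                 answer.append(cnt)
--     answer.sort()
--     return answer
-- ===== SOURCE B (Python) =====
-- def solution(grid):
--     h, w = len(grid), len(grid[0])
--     n = 4 * w * h
--
--     def step(s):
--         i, x, y = s % 4, s // 4 % w, s // (4 * w)
--         c = grid[y][x]
--         if c == 'R':
--             i = (3, 2, 0, 1)[i]
--         elif c == 'L':
--             i = (2, 3, 1, 0)[i]
--         dy, dx = ((-1, 0), (1, 0), (0, 1), (0, -1))[i]
--         return ((y + dy) % h * w + (x + dx) % w) * 4 + i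
--
--     lengths = []
--     for s in range(n):
--         # cycle-leader technique: no visited bookkeeping; walk the cycle once,
--         # tracking its length and its smallest state, and record the length
--         # only from the cycle's smallest state.
--         length, smallest, cur = 1, s, step(s)
--         while cur != s:
--             if cur < smallest:
--                 smallest = cur
--             cur = step(cur)
--             length += 1
--         if smallest == s:
--             lengths.append(length)
--     return sorted(lengths)
-- ===== Notes on version B (the rewrite author's own statement) =====
-- stated objective: alternative
-- what changed: B replaces A's mutable bookkeeping (the 4-D possibility grid marking used states) by the stateless cycle-leader technique: every state walks its own cycle once, computing the cycle's length and smallest state, and the length is recorded only when the walking state IS the cycle's smallest element, so no visited structure exists at all; states are flat integer ids and the step is computed arithmetically instead of via direction/turn tables.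
import Mathlib
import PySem

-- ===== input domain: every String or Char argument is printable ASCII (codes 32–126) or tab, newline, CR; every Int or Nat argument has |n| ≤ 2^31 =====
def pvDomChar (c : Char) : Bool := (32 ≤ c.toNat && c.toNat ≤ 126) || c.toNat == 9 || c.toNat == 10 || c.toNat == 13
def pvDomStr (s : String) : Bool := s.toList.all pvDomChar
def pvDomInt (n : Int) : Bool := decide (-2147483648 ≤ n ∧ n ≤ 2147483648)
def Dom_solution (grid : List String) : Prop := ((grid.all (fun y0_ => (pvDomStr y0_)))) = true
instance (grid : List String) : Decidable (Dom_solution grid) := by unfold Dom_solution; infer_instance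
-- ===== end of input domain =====

-- B replaces A's mutable bookkeeping (the 4-D possibility grid) by the stateless cycle-leader
-- technique: every flat state id walks its cycle once computing the cycle's length and smallest
-- state, and records the length only when it is itself the smallest; objective: alternative.

-- ===== PORT A =====
def pvDirA : List (List Int) := [[-1, 0], [1, 0], [0, 1], [0, -1]]
def pvRightA : PySem.Dict Int Int := PySem.Dict.ofList [(0, 3), (1, 2), (2, 0), (3, 1)]
def pvLeftA : PySem.Dict Int Int := PySem.Dict.ofList [(0, 2), (1, 3), (2, 1), (3, 0)]

-- possibility[y][x][i] -= 1  (indices are always in range when reached)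
def pvDec3 (p : List (List (List Int))) (y x i : Int) : List (List (List Int)) :=
  let row := PySem.List.pyGetD p y []
  let cell := PySem.List.pyGetD row x []
  PySem.List.pySetD p y (PySem.List.pySetD row x
    (PySem.List.pySetD cell i (PySem.List.pyGetD cell i 0 - 1)))

-- the `while True` walk of A; fuel 4*w*h bounds the cycle length (the step map is a
-- permutation of the 4*w*h states), so the fuel-0 branch is never taken on admitted inputs
def pvWalkA (grid : List String) (w h sy sx si : Int) :
    Nat → List (List (List Int)) → Int → Int → Int → Int → List (List (List Int)) × Int
  | 0, poss, cnt, _, _, _ => (poss, cnt)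
  | fuel + 1, poss, cnt, cy, cx, ci =>
    let poss' := pvDec3 poss cy cx ci
    let cnt' := cnt + 1
    let c := (PySem.Str.pyGet? (PySem.List.pyGetD grid cy "") cx).getD ' '
    let ci' := if c = 'R' then PySem.Dict.getD pvRightA ci 0
               else if c = 'L' then PySem.Dict.getD pvLeftA ci 0 else ci
    let cx' := PySem.Int.mod (cx + PySem.List.pyGetD (PySem.List.pyGetD pvDirA ci' []) 1 0) w
    let cy' := PySem.Int.mod (cy + PySem.List.pyGetD (PySem.List.pyGetD pvDirA ci' []) 0 0) h
    if cx' = sx ∧ cy' = sy ∧ ci' = si then (poss', cnt')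
    else pvWalkA grid w h sy sx si fuel poss' cnt' cy' cx' ci'

def solution (grid : List String) : List Int :=
  let w : Int := PySem.Str.len ((PySem.List.pyGet? grid 0).getD "")  -- grid[0]: IndexError on [] (outside Pre_)
  let h : Int := PySem.List.len grid
  let poss0 := List.replicate h.toNat (List.replicate w.toNat ([1, 1, 1, 1] : List Int))
  let res := (PySem.List.pyRange 0 h 1).foldl (fun st y =>
      (PySem.List.pyRange 0 w 1).foldl (fun st x =>
        (PySem.List.pyRange 0 4 1).foldl (fun st i =>
          if PySem.List.pyGetD (PySem.List.pyGetD (PySem.List.pyGetD st.1 y []) x []) i 0 = 0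
          then st
          else
            let r := pvWalkA grid w h y x i (4 * w.toNat * h.toNat) st.1 0 y x i
            (r.1, st.2 ++ [r.2])) st) st) (poss0, ([] : List Int))
  PySem.List.sorted res.2 (fun v => v) false

-- ===== PORT B =====
-- step: successor of state id s = (y*w + x)*4 + i (turn, then step with modular wrap);
-- (y±1) % h and (x±1) % w are computed in Int and are nonnegative (positive modulus), so toNat is exact
def pvNxtOf (grid : List String) (w h : Nat) (s : Nat) : Nat :=
  let i0 := s % 4
  let x := (s / 4) % w
  let y := s / (4 * w)
  let c := (PySem.Str.pyGet? (PySem.List.pyGetD grid (y : Int) "") (x : Int)).getD ' '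
  let i := if c = 'R' then [3, 2, 0, 1].getD i0 0
           else if c = 'L' then [2, 3, 1, 0].getD i0 0 else i0
  let d := [((-1 : Int), (0 : Int)), (1, 0), (0, 1), (0, -1)].getD i (0, 0)
  ((PySem.Int.mod ((y : Int) + d.1) (h : Int)).toNat * w
    + (PySem.Int.mod ((x : Int) + d.2) (w : Int)).toNat) * 4 + i

-- B's `while cur != s` loop: length and smallest state of the cycle through s;
-- fuel 4*w*h bounds the cycle length (the step map is a permutation), so on admitted
-- inputs the fuel-0 branch is never taken
def pvWalkB (grid : List String) (w h s : Nat) :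
    Nat → Nat → Nat → Nat → Nat × Nat
  | 0, length, smallest, _ => (length, smallest)
  | fuel + 1, length, smallest, cur =>
    if cur = s then (length, smallest)
    else pvWalkB grid w h s fuel (length + 1) (if cur < smallest then cur else smallest)
      (pvNxtOf grid w h cur)

def solution_alt (grid : List String) : List Int :=
  let h := grid.length
  let w := ((PySem.List.pyGet? grid 0).getD "").toList.length  -- len(grid[0]): IndexError on [] (outside Pre_)
  let n := 4 * w * h
  let lengths := (List.range n).foldl (fun lengths s =>
      let r := pvWalkB grid w h s n 1 s (pvNxtOf grid w h s)
      if r.2 = s then lengths ++ [(r.1 : Int)] else lengths) ([] : List Int)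
  PySem.List.sorted lengths (fun v => v) false

-- ===== PRECONDITION & SPEC =====
-- Pre_ excludes exactly the inputs where Python A raises: the empty grid (grid[0] is an
-- IndexError) and grids with a row shorter than row 0 (grid[y][x] is an IndexError there,
-- since every cell with x < len(grid[0]) is eventually visited).
def Pre_solution (grid : List String) : Prop :=
  grid ≠ [] ∧ ∀ s ∈ grid, (grid.headD "").toList.length ≤ s.toList.length
instance (grid : List String) : Decidable (Pre_solution grid) := by
  unfold Pre_solution; infer_instance
def pvWitness_solution : List String := ["SL", "LR"]

def Spec_solution (grid : List String) (out : List Int) : Prop := out = solution_alt grid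
instance (grid : List String) (out : List Int) : Decidable (Spec_solution grid out) := by
  unfold Spec_solution; infer_instance

-- ===== CLAIM (what is proved, stated in full; the proofs are below) =====
def Claim_equal_solution : Prop :=
  ∀ (grid : List String), Dom_solution grid → Pre_solution grid →
    Spec_solution grid (solution grid)

-- ===== LEMMAS AND PROOFS =====
-- ===== decode/encode =====
def pvYOf (w s : Nat) : Nat := s / (4 * w)
def pvXOf (w s : Nat) : Nat := s / 4 % w
def pvIOf (s : Nat) : Nat := s % 4
def pvEnc (w y x i : Nat) : Nat := (y * w + x) * 4 + i

theorem pvEnc_decode (w s : Nat) : pvEnc w (pvYOf w s) (pvXOf w s) (pvIOf s) = s := by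
  unfold pvEnc pvYOf pvXOf pvIOf
  have h1 : s / (4 * w) * w + s / 4 % w = s / 4 := by
    rw [← Nat.div_div_eq_div_mul, Nat.mul_comm]
    exact Nat.div_add_mod _ w
  have h2 := Nat.div_add_mod s 4
  omega

theorem pvDecode_enc (w y x i : Nat) (hx : x < w) (hi : i < 4) :
    pvYOf w (pvEnc w y x i) = y ∧ pvXOf w (pvEnc w y x i) = x ∧ pvIOf (pvEnc w y x i) = i := by
  unfold pvYOf pvXOf pvIOf pvEnc
  have e : (y * w + x) * 4 + i = (4 * w) * y + (x * 4 + i) := by ring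
  refine ⟨?_, ?_, ?_⟩
  · have h0 : (x * 4 + i) / (4 * w) = 0 := Nat.div_eq_of_lt (by omega)
    rw [e, Nat.mul_add_div (by omega), h0]; omega
  · have : ((y * w + x) * 4 + i) / 4 = y * w + x := by omega
    rw [this, Nat.mul_add_mod', Nat.mod_eq_of_lt hx]
  · omega

theorem pvEnc_lt (w h y x i : Nat) (hy : y < h) (hx : x < w) (hi : i < 4) :
    pvEnc w y x i < 4 * w * h := by
  unfold pvEnc
  have : y * w + x < h * w := by
    calc y * w + x < y * w + w := by omega
    _ = (y + 1) * w := by ring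
    _ ≤ h * w := Nat.mul_le_mul_right w hy
  calc (y * w + x) * 4 + i < (y * w + x) * 4 + 4 := by omega
  _ = (y * w + x + 1) * 4 := by ring
  _ ≤ h * w * 4 := Nat.mul_le_mul_right 4 (by omega)
  _ = 4 * w * h := by ring

theorem pvYOf_lt (w h s : Nat) (hs : s < 4 * w * h) : pvYOf w s < h := by
  unfold pvYOf
  have hw : 0 < w := by by_contra hw; simp [Nat.eq_zero_of_not_pos hw] at hs
  exact Nat.div_lt_of_lt_mul (by omega)

theorem pvXOf_lt (w s : Nat) (hw : 0 < w) : pvXOf w s < w := Nat.mod_lt _ hw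
theorem pvIOf_lt (s : Nat) : pvIOf s < 4 := Nat.mod_lt _ (by omega)

-- ===== the step map and its inverse =====
def pvChar (grid : List String) (y x : Nat) : Char :=
  (PySem.Str.pyGet? (PySem.List.pyGetD grid (y : Int) "") (x : Int)).getD ' '

def pvTurn (c : Char) (i : Nat) : Nat :=
  if c = 'R' then [3, 2, 0, 1].getD i 0 else if c = 'L' then [2, 3, 1, 0].getD i 0 else i

def pvTurnInv (c : Char) (i : Nat) : Nat :=
  if c = 'R' then [2, 3, 1, 0].getD i 0 else if c = 'L' then [3, 2, 0, 1].getD i 0 else i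

def pvDy (i : Nat) : Int :=
  (([((-1 : Int), (0 : Int)), (1, 0), (0, 1), (0, -1)]).getD i (0, 0)).1
def pvDx (i : Nat) : Int :=
  (([((-1 : Int), (0 : Int)), (1, 0), (0, 1), (0, -1)]).getD i (0, 0)).2

theorem pvTurn_lt (c : Char) (i : Nat) (hi : i < 4) : pvTurn c i < 4 := by
  unfold pvTurn; split_ifs <;> interval_cases i <;> simp

theorem pvTurnInv_turn (c : Char) (i : Nat) (hi : i < 4) : pvTurnInv c (pvTurn c i) = i := by
  unfold pvTurn pvTurnInv; split_ifs <;> interval_cases i <;> simp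

theorem pvModToNat_lt (a : Int) (h : Nat) (hh : 0 < h) : (PySem.Int.mod a (h : Int)).toNat < h := by
  have h1 := PySem.Int.mod_lt a (b := (h : Int)) (by exact_mod_cast hh)
  have h2 := PySem.Int.mod_nonneg a (b := (h : Int)) (by exact_mod_cast hh)
  omega

theorem pvNxtOf_eq (grid : List String) (w h s : Nat) :
    pvNxtOf grid w h s =
      pvEnc w (PySem.Int.mod ((pvYOf w s : Int) + pvDy (pvTurn (pvChar grid (pvYOf w s) (pvXOf w s)) (pvIOf s))) (h : Int)).toNat
        (PySem.Int.mod ((pvXOf w s : Int) + pvDx (pvTurn (pvChar grid (pvYOf w s) (pvXOf w s)) (pvIOf s))) (w : Int)).toNat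
        (pvTurn (pvChar grid (pvYOf w s) (pvXOf w s)) (pvIOf s)) := by
  simp only [pvNxtOf, pvEnc, pvYOf, pvXOf, pvIOf, pvChar, pvTurn, pvDy, pvDx]

theorem pvNxtOf_lt (grid : List String) (w h : Nat) (hw : 0 < w) (hh : 0 < h) (s : Nat) :
    pvNxtOf grid w h s < 4 * w * h := by
  rw [pvNxtOf_eq]
  exact pvEnc_lt _ _ _ _ _ (pvModToNat_lt _ _ hh) (pvModToNat_lt _ _ hw)
    (pvTurn_lt _ _ (pvIOf_lt s))

def pvPrevY (w h s : Nat) : Nat := (PySem.Int.mod ((pvYOf w s : Int) - pvDy (pvIOf s)) (h : Int)).toNat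
def pvPrevX (w s : Nat) : Nat := (PySem.Int.mod ((pvXOf w s : Int) - pvDx (pvIOf s)) (w : Int)).toNat
def pvPrev (grid : List String) (w h s : Nat) : Nat :=
  pvEnc w (pvPrevY w h s) (pvPrevX w s)
    (pvTurnInv (pvChar grid (pvPrevY w h s) (pvPrevX w s)) (pvIOf s))

theorem pvMod_roundtrip (a d : Int) (h : Nat) (hh : 0 < h) (ha : 0 ≤ a) (hlt : a < h) :
    PySem.Int.mod (PySem.Int.mod (a + d) (h : Int) - d) (h : Int) = a := by
  have hh' : (0 : Int) < (h : Int) := by exact_mod_cast hh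
  rw [PySem.Int.mod_eq_emod_of_pos hh', PySem.Int.mod_eq_emod_of_pos hh']
  have e : ((a + d) % (h : Int) - d) % (h : Int) = (a + d - d) % (h : Int) := by
    conv_lhs => rw [Int.sub_emod]
    conv_rhs => rw [Int.sub_emod]
    rw [Int.emod_emod_of_dvd _ dvd_rfl]
  rw [e]
  simp only [add_sub_cancel_right]
  exact Int.emod_eq_of_lt ha hlt

theorem pvPrev_nxt (grid : List String) (w h : Nat) (hw : 0 < w) (hh : 0 < h)
    (s : Nat) (hs : s < 4 * w * h) :
    pvPrev grid w h (pvNxtOf grid w h s) = s := by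
  have hy := pvYOf_lt w h s hs
  have hx := pvXOf_lt w s hw
  have hi := pvIOf_lt s
  rw [pvNxtOf_eq]
  set I := pvTurn (pvChar grid (pvYOf w s) (pvXOf w s)) (pvIOf s) with hI
  set Y := (PySem.Int.mod ((pvYOf w s : Int) + pvDy I) (h : Int)).toNat with hY
  set X := (PySem.Int.mod ((pvXOf w s : Int) + pvDx I) (w : Int)).toNat with hX
  have hYlt : Y < h := pvModToNat_lt _ _ hh
  have hXlt : X < w := pvModToNat_lt _ _ hw
  have hIlt : I < 4 := pvTurn_lt _ _ hi
  obtain ⟨dy, dx, di⟩ := pvDecode_enc w Y X I hXlt hIlt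
  unfold pvPrev pvPrevY pvPrevX
  rw [dy, dx, di]
  have hYc : (Y : Int) = PySem.Int.mod ((pvYOf w s : Int) + pvDy I) (h : Int) := by
    rw [hY]; exact Int.toNat_of_nonneg (PySem.Int.mod_nonneg _ (by exact_mod_cast hh))
  have hXc : (X : Int) = PySem.Int.mod ((pvXOf w s : Int) + pvDx I) (w : Int) := by
    rw [hX]; exact Int.toNat_of_nonneg (PySem.Int.mod_nonneg _ (by exact_mod_cast hw))
  have hy0 : (PySem.Int.mod ((Y : Int) - pvDy I) (h : Int)).toNat = pvYOf w s := by
    rw [hYc, pvMod_roundtrip _ _ _ hh (Int.natCast_nonneg _) (by exact_mod_cast hy)]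
    exact Int.toNat_natCast _
  have hx0 : (PySem.Int.mod ((X : Int) - pvDx I) (w : Int)).toNat = pvXOf w s := by
    rw [hXc, pvMod_roundtrip _ _ _ hw (Int.natCast_nonneg _) (by exact_mod_cast hx)]
    exact Int.toNat_natCast _
  simp only [hy0, hx0]
  rw [hI, pvTurnInv_turn _ _ hi]
  exact pvEnc_decode w s

theorem pvNxt_inj (grid : List String) (w h : Nat) (hw : 0 < w) (hh : 0 < h)
    (u v : Nat) (hu : u < 4 * w * h) (hv : v < 4 * w * h)
    (he : pvNxtOf grid w h u = pvNxtOf grid w h v) : u = v := by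
  have := congrArg (pvPrev grid w h) he
  rwa [pvPrev_nxt grid w h hw hh u hu, pvPrev_nxt grid w h hw hh v hv] at this

-- ===== iterates, return to start, minimal period =====
theorem pvIter_lt (grid : List String) (w h : Nat) (hw : 0 < w) (hh : 0 < h)
    (s : Nat) (hs : s < 4 * w * h) (t : Nat) :
    (pvNxtOf grid w h)^[t] s < 4 * w * h := by
  induction t with
  | zero => simpa
  | succ t ih =>
    rw [Function.iterate_succ_apply']
    exact pvNxtOf_lt grid w h hw hh _

theorem pvIter_cancel (grid : List String) (w h : Nat) (hw : 0 < w) (hh : 0 < h)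
    (a u v : Nat) (hu : u < 4 * w * h) (hv : v < 4 * w * h)
    (he : (pvNxtOf grid w h)^[a] u = (pvNxtOf grid w h)^[a] v) : u = v := by
  induction a with
  | zero => simpa using he
  | succ a ih =>
    apply ih
    rw [Function.iterate_succ_apply'] at he
    rw [Function.iterate_succ_apply'] at he
    exact pvNxt_inj grid w h hw hh _ _ (pvIter_lt grid w h hw hh u hu a)
      (pvIter_lt grid w h hw hh v hv a) he

theorem pvReturn_exists (grid : List String) (w h : Nat) (hw : 0 < w) (hh : 0 < h)
    (s : Nat) (hs : s < 4 * w * h) :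
    ∃ p, 0 < p ∧ p ≤ 4 * w * h ∧ (pvNxtOf grid w h)^[p] s = s := by
  set n := 4 * w * h with hn
  have hmap : ∀ t ∈ Finset.range (n + 1), (pvNxtOf grid w h)^[t] s ∈ Finset.range n := by
    intro t _
    simpa using pvIter_lt grid w h hw hh s hs t
  obtain ⟨a, ha, b, hb, hab, he⟩ :=
    Finset.exists_ne_map_eq_of_card_lt_of_maps_to (by simp) hmap
  rcases Nat.lt_or_ge a b with hlt | hge
  · refine ⟨b - a, by omega, by simp at hb; omega, ?_⟩
    have : (pvNxtOf grid w h)^[a] ((pvNxtOf grid w h)^[b - a] s) = (pvNxtOf grid w h)^[a] s := by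
      rw [← Function.iterate_add_apply]
      have : a + (b - a) = b := by omega
      rw [this, he]
    exact pvIter_cancel grid w h hw hh a _ s (pvIter_lt grid w h hw hh s hs _) hs this
  · have hlt : b < a := by omega
    refine ⟨a - b, by omega, by simp at ha; omega, ?_⟩
    have : (pvNxtOf grid w h)^[b] ((pvNxtOf grid w h)^[a - b] s) = (pvNxtOf grid w h)^[b] s := by
      rw [← Function.iterate_add_apply]
      have : b + (a - b) = a := by omega
      rw [this, he]
    exact pvIter_cancel grid w h hw hh b _ s (pvIter_lt grid w h hw hh s hs _) hs this

-- iterates are purely periodic: reduce the exponent modulo any return time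
theorem pvIterate_mod {α : Type} (f : α → α) (s : α) (p : Nat)
    (hret : f^[p] s = s) (t : Nat) : f^[t] s = f^[t % p] s := by
  have hq : ∀ q, f^[p * q] s = s := by
    intro q
    induction q with
    | zero => simp
    | succ q ih => rw [Nat.mul_succ, Function.iterate_add_apply, hret, ih]
  conv_lhs => rw [← Nat.mod_add_div t p]
  rw [Function.iterate_add_apply, hq]

-- orbits of a permutation are symmetric
theorem pvSameOrbit (grid : List String) (w h : Nat) (hw : 0 < w) (hh : 0 < h)
    (u s : Nat) (hu : u < 4 * w * h) (t : Nat)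
    (he : (pvNxtOf grid w h)^[t] u = s) :
    ∃ t', t' < 4 * w * h ∧ (pvNxtOf grid w h)^[t'] s = u := by
  obtain ⟨p, hppos, hple, hpret⟩ := pvReturn_exists grid w h hw hh u hu
  have hr : (pvNxtOf grid w h)^[t % p] u = s := by
    rw [← pvIterate_mod _ _ _ hpret]; exact he
  by_cases h0 : t % p = 0
  · refine ⟨0, by omega, ?_⟩
    rw [h0] at hr
    simp at hr ⊢
    omega
  · have hrp : t % p < p := Nat.mod_lt _ (by omega)
    refine ⟨p - t % p, by omega, ?_⟩
    rw [← hr, ← Function.iterate_add_apply]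
    have : p - t % p + t % p = p := by omega
    rw [this, hpret]

-- ===== the B walk: length and smallest state of the cycle =====
theorem pvFoldMin_le_init (L : List Nat) :
    ∀ mn, L.foldl (fun m a => if a < m then a else m) mn ≤ mn := by
  induction L with
  | nil => intro mn; simp
  | cons a L ih =>
    intro mn
    rw [List.foldl_cons]
    refine le_trans (ih _) ?_
    split_ifs <;> omega

theorem pvFoldMin_le_mem (L : List Nat) :
    ∀ mn a, a ∈ L → L.foldl (fun m a => if a < m then a else m) mn ≤ a := by
  induction L with
  | nil => intro mn a ha; simp at ha
  | cons b L ih =>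
    intro mn a ha
    rw [List.foldl_cons]
    rcases List.mem_cons.mp ha with rfl | ha
    · refine le_trans (pvFoldMin_le_init L _) ?_
      split_ifs <;> omega
    · exact ih _ a ha

theorem pvFoldMin_eq_iff (L : List Nat) (mn : Nat) :
    L.foldl (fun m a => if a < m then a else m) mn = mn ↔ ∀ a ∈ L, mn ≤ a := by
  constructor
  · intro he a ha
    rw [← he]
    exact pvFoldMin_le_mem L mn a ha
  · intro hall
    induction L generalizing mn with
    | nil => rfl
    | cons a L ih =>
      rw [List.foldl_cons, if_neg (by have := hall a (by simp); omega)]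
      exact ih mn (fun b hb => hall b (by simp [hb]))

theorem pvWalkB_spec (grid : List String) (w h s p : Nat)
    (hret : (pvNxtOf grid w h)^[p] s = s)
    (hmin : ∀ t, 0 < t → t < p → (pvNxtOf grid w h)^[t] s ≠ s) :
    ∀ fuel j length smallest, 0 < j → j ≤ p → p - j ≤ fuel →
      pvWalkB grid w h s fuel length smallest ((pvNxtOf grid w h)^[j] s) =
        (length + (p - j),
          ((List.range (p - j)).map (fun t => (pvNxtOf grid w h)^[j + t] s)).foldl
            (fun m a => if a < m then a else m) smallest) := by
  intro fuel
  induction fuel with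
  | zero =>
    intro j length smallest hj hjp hfuel
    have hjp' : j = p := by omega
    subst hjp'
    simp [pvWalkB]
  | succ fuel ih =>
    intro j length smallest hj hjp hfuel
    by_cases hjp' : j = p
    · subst hjp'
      simp [pvWalkB, hret]
    · have hjlt : j < p := by omega
      have hne : (pvNxtOf grid w h)^[j] s ≠ s := hmin j hj hjlt
      simp only [pvWalkB]
      rw [if_neg hne]
      have hstep : pvNxtOf grid w h ((pvNxtOf grid w h)^[j] s) = (pvNxtOf grid w h)^[j + 1] s :=
        (Function.iterate_succ_apply' _ _ _).symm
      rw [hstep, ih (j + 1) _ _ (by omega) (by omega) (by omega)]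
      have hrange : p - j = (p - j - 1) + 1 := by omega
      rw [hrange, List.range_succ_eq_map, List.map_cons, List.foldl_cons]
      simp only [Nat.add_zero]
      have hlists : List.map (fun t => (pvNxtOf grid w h)^[j + 1 + t] s) (List.range (p - (j + 1)))
          = List.map ((fun t => (pvNxtOf grid w h)^[j + t] s) ∘ Nat.succ) (List.range (p - j - 1)) := by
        rw [show p - (j + 1) = p - j - 1 by omega]
        apply List.map_congr_left
        intro t _
        simp only [Function.comp_apply]
        rw [show j + 1 + t = j + Nat.succ t by omega]
      simp only [Prod.mk.injEq]
      constructor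
      · omega
      · rw [List.map_map, ← hlists]

-- ===== ghost visited-array walk (proof-only bridge between A and B) =====
def pvFollow (nxt : List Nat) (s : Nat) :
    Nat → List Bool → Nat → Nat → List Bool × Nat
  | 0, visited, cnt, _ => (visited, cnt)
  | fuel + 1, visited, cnt, cur =>
    let visited' := visited.set cur true
    let cnt' := cnt + 1
    let cur' := nxt.getD cur 0
    if cur' = s then (visited', cnt') else pvFollow nxt s fuel visited' cnt' cur'

theorem pvFollow_spec (grid : List String) (w h : Nat) (nxt : List Nat) (s p : Nat)
    (hs : s < 4 * w * h)
    (hnxt : ∀ u, u < 4 * w * h → nxt.getD u 0 = pvNxtOf grid w h u)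
    (hw : 0 < w) (hh : 0 < h)
    (hret : (pvNxtOf grid w h)^[p] s = s)
    (hmin : ∀ t, 0 < t → t < p → (pvNxtOf grid w h)^[t] s ≠ s) :
    ∀ fuel j visited cnt, j < p → p - j ≤ fuel →
      pvFollow nxt s fuel visited cnt ((pvNxtOf grid w h)^[j] s) =
        (((List.range (p - j)).map (fun t => (pvNxtOf grid w h)^[j + t] s)).foldl
            (fun v u => v.set u true) visited,
          cnt + (p - j)) := by
  intro fuel
  induction fuel with
  | zero => intro j visited cnt hj hfuel; omega
  | succ fuel ih =>
    intro j visited cnt hj hfuel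
    have hnext : nxt.getD ((pvNxtOf grid w h)^[j] s) 0 = (pvNxtOf grid w h)^[j + 1] s := by
      rw [hnxt _ (pvIter_lt grid w h hw hh s hs j)]
      exact (Function.iterate_succ_apply' _ _ _).symm
    have hrange : p - j = (p - j - 1) + 1 := by omega
    rw [hrange, List.range_succ_eq_map, List.map_cons, List.foldl_cons]
    simp only [Nat.add_zero]
    by_cases hjp : j + 1 = p
    · simp only [pvFollow, hnext]
      rw [if_pos (by rw [hjp]; exact hret)]
      have : p - j - 1 = 0 := by omega
      simp [this]
    · simp only [pvFollow, hnext]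
      rw [if_neg (by exact hmin (j + 1) (by omega) (by omega))]
      rw [ih (j + 1) _ _ (by omega) (by omega)]
      rw [List.foldl_map]
      have harg : ∀ t : Nat, j + 1 + t = j + (t + 1) := by omega
      simp only [harg]
      have : p - (j + 1) = p - j - 1 := by omega
      rw [this]
      have : cnt + 1 + (p - j - 1) = cnt + (p - j - 1 + 1) := by omega
      rw [this]
      simp only [List.map_map, List.foldl_map, Function.comp, Nat.succ_eq_add_one]

-- ===== A-side: nested possibility grid =====
def pvVal3 (P : List (List (List Int))) (y x i : Nat) : Int :=
  ((P.getD y []).getD x []).getD i 0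

def pvDec3N (P : List (List (List Int))) (y x i : Nat) : List (List (List Int)) :=
  P.set y ((P.getD y []).set x (((P.getD y []).getD x []).set i (pvVal3 P y x i - 1)))

theorem pvDec3_natCast (P : List (List (List Int))) (y x i : Nat) :
    pvDec3 P (y : Int) (x : Int) (i : Int) = pvDec3N P y x i := by
  simp [pvDec3, pvDec3N, pvVal3]

theorem pvRead3_natCast (P : List (List (List Int))) (y x i : Nat) :
    PySem.List.pyGetD (PySem.List.pyGetD (PySem.List.pyGetD P (y : Int) []) (x : Int) []) (i : Int) 0
      = pvVal3 P y x i := by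
  simp [pvVal3]

def pvShape (w h : Nat) (P : List (List (List Int))) : Prop :=
  P.length = h ∧ ∀ r ∈ P, r.length = w ∧ ∀ c ∈ r, c.length = 4

theorem pvGetElem?_set {α : Type} (l : List α) (i j : Nat) (a : α) :
    (l.set i a)[j]? = if i = j ∧ i < l.length then some a else l[j]? := by
  rw [List.getElem?_set]; split <;> simp_all

theorem pvGetD_set {α : Type} (l : List α) (n m : Nat) (v d : α) :
    (l.set n v).getD m d = if n = m ∧ n < l.length then v else l.getD m d := by
  simp only [List.getD, pvGetElem?_set]
  by_cases hc : n = m ∧ n < l.length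
  · obtain ⟨h1, h2⟩ := hc; subst h1; simp [h2]
  · simp [hc]

theorem pvGetD_mem {α : Type} (l : List α) (n : Nat) (d : α) (h : n < l.length) :
    l.getD n d ∈ l := by
  rw [List.getD_eq_getElem l d h]
  exact List.getElem_mem h

theorem pvShape_dec3N (w h : Nat) (P : List (List (List Int))) (hS : pvShape w h P)
    (y x i : Nat) (hy : y < h) (hx : x < w) : pvShape w h (pvDec3N P y x i) := by
  obtain ⟨hlen, hrows⟩ := hS
  have hyP : y < P.length := by omega
  obtain ⟨hrl, hcells⟩ := hrows _ (pvGetD_mem P y [] hyP)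
  refine ⟨by simp [pvDec3N, hlen], ?_⟩
  intro r hr
  rcases List.mem_or_eq_of_mem_set hr with hr | hr
  · exact hrows r hr
  · subst hr
    refine ⟨by simpa using hrl, ?_⟩
    intro c hc
    rcases List.mem_or_eq_of_mem_set hc with hc | hc
    · exact hcells c hc
    · subst hc
      simpa using hcells _ (pvGetD_mem _ x [] (by omega))

theorem pvVal3_dec3N (w h : Nat) (P : List (List (List Int))) (hS : pvShape w h P)
    (y x i y' x' i' : Nat) (hy : y < h) (hx : x < w) (hi : i < 4)
    (hy' : y' < h) (hx' : x' < w) (hi' : i' < 4) :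
    pvVal3 (pvDec3N P y x i) y' x' i' =
      pvVal3 P y' x' i' - (if y = y' ∧ x = x' ∧ i = i' then 1 else 0) := by
  obtain ⟨hlen, hrows⟩ := hS
  have hyP : y < P.length := by omega
  obtain ⟨hrl, hcells⟩ := hrows _ (pvGetD_mem P y [] hyP)
  have hxR : x < (P.getD y []).length := by omega
  have hiC : i < ((P.getD y []).getD x []).length := by
    have := hcells _ (pvGetD_mem _ x [] hxR); omega
  unfold pvDec3N pvVal3
  rw [pvGetD_set (d := [])]
  by_cases hyy : y = y'
  · subst hyy
    rw [if_pos ⟨rfl, hyP⟩, pvGetD_set (d := [])]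
    by_cases hxx : x = x'
    · subst hxx
      rw [if_pos ⟨rfl, hxR⟩, pvGetD_set (d := 0)]
      by_cases hii : i = i'
      · subst hii
        rw [if_pos ⟨rfl, hiC⟩]
        simp
      · rw [if_neg (by tauto)]
        simp [hii]
    · rw [if_neg (by tauto)]
      simp [hxx]
  · rw [if_neg (by tauto)]
    simp [hyy]

theorem pvEnc_eq_iff (w h : Nat) (y x i u : Nat) (hy : y < h) (hx : x < w) (hi : i < 4)
    (hu : u < 4 * w * h) :
    pvEnc w y x i = u ↔ (y = pvYOf w u ∧ x = pvXOf w u ∧ i = pvIOf u) := by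
  constructor
  · rintro rfl
    obtain ⟨a, b, c⟩ := pvDecode_enc w y x i hx hi
    exact ⟨a.symm, b.symm, c.symm⟩
  · rintro ⟨rfl, rfl, rfl⟩
    exact pvEnc_decode w u

-- decrementing along a duplicate-free list of states
theorem pvVal3_foldl_dec (w h : Nat) (hw : 0 < w)
    (L : List Nat) :
    ∀ P, (∀ u ∈ L, u < 4 * w * h) → L.Nodup → pvShape w h P →
      pvShape w h (L.foldl (fun P u => pvDec3N P (pvYOf w u) (pvXOf w u) (pvIOf u)) P) ∧
      ∀ y x i, y < h → x < w → i < 4 →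
        pvVal3 (L.foldl (fun P u => pvDec3N P (pvYOf w u) (pvXOf w u) (pvIOf u)) P) y x i =
          pvVal3 P y x i - (if pvEnc w y x i ∈ L then 1 else 0) := by
  induction L with
  | nil => intro P _ _ hS; exact ⟨hS, by intros; simp⟩
  | cons u L ih =>
    intro P hmem hnd hS
    have hu : u < 4 * w * h := hmem u (by simp)
    have hyu : pvYOf w u < h := pvYOf_lt w h u hu
    have hxu : pvXOf w u < w := pvXOf_lt w u hw
    have hS' : pvShape w h (pvDec3N P (pvYOf w u) (pvXOf w u) (pvIOf u)) :=
      pvShape_dec3N w h P hS _ _ (pvIOf u) hyu hxu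
    obtain ⟨hS'', hval⟩ := ih (pvDec3N P (pvYOf w u) (pvXOf w u) (pvIOf u))
      (fun v hv => hmem v (by simp [hv])) (List.Nodup.of_cons hnd) hS'
    refine ⟨by simpa using hS'', ?_⟩
    intro y x i hy hx hi
    rw [List.foldl_cons, hval y x i hy hx hi,
      pvVal3_dec3N w h P hS _ _ _ y x i hyu hxu (pvIOf_lt u) hy hx hi]
    have hiff : (pvYOf w u = y ∧ pvXOf w u = x ∧ pvIOf u = i) ↔ pvEnc w y x i = u := by
      rw [pvEnc_eq_iff w h y x i u hy hx hi hu]; tauto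
    by_cases hcase : pvEnc w y x i = u
    · have hnotin : pvEnc w y x i ∉ L := by rw [hcase]; exact (List.nodup_cons.mp hnd).1
      rw [if_pos (hiff.mpr hcase), if_neg hnotin,
        if_pos (show pvEnc w y x i ∈ u :: L by simp [hcase])]
      omega
    · have : ¬(pvYOf w u = y ∧ pvXOf w u = x ∧ pvIOf u = i) := fun hc => hcase (hiff.mp hc)
      simp only [List.mem_cons, this, if_false]
      by_cases hin : pvEnc w y x i ∈ L <;> simp [hin, hcase]

-- marking along a list of states
theorem pvVisited_foldl (L : List Nat) :
    ∀ (v : List Bool) (m : Nat), m < v.length →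
      ((L.foldl (fun v u => v.set u true) v).getD m false
        = if m ∈ L then true else v.getD m false) ∧
      (L.foldl (fun v u => v.set u true) v).length = v.length := by
  induction L with
  | nil => intro v m hm; simp
  | cons u L ih =>
    intro v m hm
    obtain ⟨hval, hlen⟩ := ih (v.set u true) m (by simpa)
    rw [List.foldl_cons]
    refine ⟨?_, by simpa using hlen⟩
    rw [hval, pvGetD_set (d := false)]
    by_cases hmu : m = u
    · subst hmu
      by_cases hin : m ∈ L <;> simp [hin, hm]
    · by_cases hin : m ∈ L <;> simp [hin, hmu, Ne.symm hmu]

-- ===== the cycle through s, as a list of states =====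
theorem pvOrbit_nodup (grid : List String) (w h : Nat) (hw : 0 < w) (hh : 0 < h)
    (s p : Nat) (hs : s < 4 * w * h)
    (hmin : ∀ t, 0 < t → t < p → (pvNxtOf grid w h)^[t] s ≠ s) :
    ((List.range p).map (fun t => (pvNxtOf grid w h)^[t] s)).Nodup := by
  refine List.Nodup.map_on ?_ (List.nodup_range)
  intro t1 h1 t2 h2 he
  simp only [List.mem_range] at h1 h2
  by_contra hne
  rcases Nat.lt_or_ge t1 t2 with hlt | hge
  · have : (pvNxtOf grid w h)^[t1] ((pvNxtOf grid w h)^[t2 - t1] s) = (pvNxtOf grid w h)^[t1] s := by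
      rw [← Function.iterate_add_apply]
      have e : t1 + (t2 - t1) = t2 := by omega
      rw [e, he]
    exact hmin (t2 - t1) (by omega) (by omega)
      (pvIter_cancel grid w h hw hh t1 _ s (pvIter_lt grid w h hw hh s hs _) hs this)
  · have hlt : t2 < t1 := by omega
    have : (pvNxtOf grid w h)^[t2] ((pvNxtOf grid w h)^[t1 - t2] s) = (pvNxtOf grid w h)^[t2] s := by
      rw [← Function.iterate_add_apply]
      have e : t2 + (t1 - t2) = t1 := by omega
      rw [e, he.symm]
    exact hmin (t1 - t2) (by omega) (by omega)
      (pvIter_cancel grid w h hw hh t2 _ s (pvIter_lt grid w h hw hh s hs _) hs this)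

-- ===== A-side step arithmetic =====
theorem pvTurnA_eq (c : Char) (i : Nat) (hi : i < 4) :
    (if c = 'R' then PySem.Dict.getD pvRightA (i : Int) 0
     else if c = 'L' then PySem.Dict.getD pvLeftA (i : Int) 0 else (i : Int))
      = ((pvTurn c i : Nat) : Int) := by
  unfold pvTurn
  split_ifs <;> interval_cases i <;> rfl

theorem pvDirA_eq (I : Nat) (hI : I < 4) :
    PySem.List.pyGetD (PySem.List.pyGetD pvDirA (I : Int) []) 1 0 = pvDx I ∧
    PySem.List.pyGetD (PySem.List.pyGetD pvDirA (I : Int) []) 0 0 = pvDy I := by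
  interval_cases I <;> exact ⟨rfl, rfl⟩

theorem pvModCast (a : Int) (w : Nat) (hw : 0 < w) :
    (((PySem.Int.mod a (w : Int)).toNat : Nat) : Int) = PySem.Int.mod a (w : Int) :=
  Int.toNat_of_nonneg (PySem.Int.mod_nonneg _ (by exact_mod_cast hw))

theorem pvTriple_eq_iff (w h u v : Nat) (hv : v < 4 * w * h) :
    (((pvXOf w u : Nat) : Int) = ((pvXOf w v : Nat) : Int) ∧
     ((pvYOf w u : Nat) : Int) = ((pvYOf w v : Nat) : Int) ∧
     ((pvIOf u : Nat) : Int) = ((pvIOf v : Nat) : Int)) ↔ u = v := by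
  constructor
  · rintro ⟨hx, hy, hi⟩
    have hx' : pvXOf w u = pvXOf w v := by exact_mod_cast hx
    have hy' : pvYOf w u = pvYOf w v := by exact_mod_cast hy
    have hi' : pvIOf u = pvIOf v := by exact_mod_cast hi
    have := pvEnc_decode w u
    rw [hx', hy', hi'] at this
    rw [← this, pvEnc_decode w v]
  · rintro rfl; exact ⟨rfl, rfl, rfl⟩

theorem pvNxt_decode (grid : List String) (w h : Nat) (hw : 0 < w) (u : Nat) :
    pvYOf w (pvNxtOf grid w h u) =
      (PySem.Int.mod ((pvYOf w u : Int) + pvDy (pvTurn (pvChar grid (pvYOf w u) (pvXOf w u)) (pvIOf u))) (h : Int)).toNat ∧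
    pvXOf w (pvNxtOf grid w h u) =
      (PySem.Int.mod ((pvXOf w u : Int) + pvDx (pvTurn (pvChar grid (pvYOf w u) (pvXOf w u)) (pvIOf u))) (w : Int)).toNat ∧
    pvIOf (pvNxtOf grid w h u) = pvTurn (pvChar grid (pvYOf w u) (pvXOf w u)) (pvIOf u) := by
  rw [pvNxtOf_eq]
  exact pvDecode_enc w _ _ _ (pvModToNat_lt _ _ hw) (pvTurn_lt _ _ (pvIOf_lt u))

theorem pvWalkA_spec (grid : List String) (w h : Nat) (hw : 0 < w) (hh : 0 < h)
    (s p : Nat) (hs : s < 4 * w * h)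
    (hret : (pvNxtOf grid w h)^[p] s = s)
    (hmin : ∀ t, 0 < t → t < p → (pvNxtOf grid w h)^[t] s ≠ s) :
    ∀ fuel j poss cnt, j < p → p - j ≤ fuel →
      pvWalkA grid (w : Int) (h : Int) (pvYOf w s : Int) (pvXOf w s : Int) (pvIOf s : Int)
          fuel poss cnt
          (pvYOf w ((pvNxtOf grid w h)^[j] s) : Int)
          (pvXOf w ((pvNxtOf grid w h)^[j] s) : Int)
          (pvIOf ((pvNxtOf grid w h)^[j] s) : Int) =
        (((List.range (p - j)).map (fun t => (pvNxtOf grid w h)^[j + t] s)).foldl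
            (fun P u => pvDec3N P (pvYOf w u) (pvXOf w u) (pvIOf u)) poss,
          cnt + ((p - j : Nat) : Int)) := by
  intro fuel
  induction fuel with
  | zero => intro j poss cnt hj hfuel; omega
  | succ fuel ih =>
    intro j poss cnt hj hfuel
    set F := pvNxtOf grid w h with hF
    set u := F^[j] s with hu
    have hult : u < 4 * w * h := pvIter_lt grid w h hw hh s hs j
    have hFu : F u = F^[j + 1] s := (Function.iterate_succ_apply' F j s).symm
    obtain ⟨hdy, hdx, hdi⟩ := pvNxt_decode grid w h hw u
    have hIlt : pvTurn (pvChar grid (pvYOf w u) (pvXOf w u)) (pvIOf u) < 4 :=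
      pvTurn_lt _ _ (pvIOf_lt u)
    obtain ⟨hdir1, hdir0⟩ := pvDirA_eq _ hIlt
    simp only [pvWalkA]
    rw [pvDec3_natCast]
    have hcc : (PySem.Str.pyGet? (PySem.List.pyGetD grid ((pvYOf w u : Nat) : Int) "")
        ((pvXOf w u : Nat) : Int)).getD ' ' = pvChar grid (pvYOf w u) (pvXOf w u) := rfl
    rw [hcc, pvTurnA_eq _ _ (pvIOf_lt u), hdir1, hdir0]
    have hcx : PySem.Int.mod ((pvXOf w u : Int)
          + pvDx (pvTurn (pvChar grid (pvYOf w u) (pvXOf w u)) (pvIOf u))) (w : Int)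
        = ((pvXOf w (F u) : Nat) : Int) := by
      rw [hdx]; exact (pvModCast _ _ hw).symm
    have hcy : PySem.Int.mod ((pvYOf w u : Int)
          + pvDy (pvTurn (pvChar grid (pvYOf w u) (pvXOf w u)) (pvIOf u))) (h : Int)
        = ((pvYOf w (F u) : Nat) : Int) := by
      rw [hdy]; exact (pvModCast _ _ hh).symm
    have hci : ((pvTurn (pvChar grid (pvYOf w u) (pvXOf w u)) (pvIOf u) : Nat) : Int)
        = ((pvIOf (F u) : Nat) : Int) := by rw [hdi]
    rw [hcx, hcy, hci]
    have hrange : p - j = (p - j - 1) + 1 := by omega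
    rw [hrange, List.range_succ_eq_map, List.map_cons, List.foldl_cons]
    simp only [Nat.add_zero]
    by_cases hjp : j + 1 = p
    · have hbreak : F u = s := by rw [hFu, hjp]; exact hret
      rw [if_pos (by rw [hbreak]; exact ⟨rfl, rfl, rfl⟩)]
      have h0 : p - j - 1 = 0 := by omega
      rw [h0]
      simp [← hu]
    · have hne : F u ≠ s := by rw [hFu]; exact hmin (j + 1) (by omega) (by omega)
      rw [if_neg (by
        intro hcon
        exact hne ((pvTriple_eq_iff w h (F u) s hs).mp hcon))]
      rw [hFu, ih (j + 1) _ _ (by omega) (by omega)]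
      rw [List.foldl_map]
      have harg : ∀ t : Nat, j + 1 + t = j + (t + 1) := by omega
      simp only [harg]
      have h1 : p - (j + 1) = p - j - 1 := by omega
      rw [h1]
      have h2 : cnt + 1 + ((p - j - 1 : Nat) : Int) = cnt + ((p - j - 1 + 1 : Nat) : Int) := by push_cast; ring
      rw [h2]
      simp only [List.map_map, List.foldl_map, Function.comp, Nat.succ_eq_add_one, ← hu]

-- ===== relating A's loop state to the ghost visited array =====
def pvRel (w h : Nat) (P : List (List (List Int))) (v : List Bool) : Prop :=
  pvShape w h P ∧ v.length = 4 * w * h ∧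
    ∀ y x i, y < h → x < w → i < 4 →
      pvVal3 P y x i = if v.getD (pvEnc w y x i) false then 0 else 1

def pvClosed (grid : List String) (w h : Nat) (v : List Bool) : Prop :=
  ∀ u, u < 4 * w * h → v.getD u false = v.getD (pvNxtOf grid w h u) false

theorem pvOrbit_unvisited (grid : List String) (w h : Nat) (hw : 0 < w) (hh : 0 < h)
    (v : List Bool) (hcl : pvClosed grid w h v) (s : Nat) (hs : s < 4 * w * h)
    (hvs : v.getD s false = false) (t : Nat) :
    v.getD ((pvNxtOf grid w h)^[t] s) false = false := by
  induction t with
  | zero => simpa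
  | succ t ih =>
    rw [Function.iterate_succ_apply', ← hcl _ (pvIter_lt grid w h hw hh s hs t)]
    exact ih

theorem pvOrbit_mem_iff (grid : List String) (w h : Nat) (hw : 0 < w) (hh : 0 < h)
    (s p : Nat) (hs : s < 4 * w * h) (hp : 0 < p)
    (hret : (pvNxtOf grid w h)^[p] s = s)
    (m : Nat) (hm : m < 4 * w * h) :
    (pvNxtOf grid w h m ∈ (List.range p).map (fun t => (pvNxtOf grid w h)^[t] s)
      ↔ m ∈ (List.range p).map (fun t => (pvNxtOf grid w h)^[t] s)) := by
  simp only [List.mem_map, List.mem_range]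
  constructor
  · rintro ⟨t, ht, he⟩
    rcases Nat.eq_zero_or_pos t with rfl | htpos
    · refine ⟨p - 1, by omega, ?_⟩
      apply pvNxt_inj grid w h hw hh _ _ (pvIter_lt grid w h hw hh s hs _) hm
      rw [← Function.iterate_succ_apply' (pvNxtOf grid w h)]
      have e : (p - 1).succ = p := by omega
      rw [e, hret]
      simpa using he
    · refine ⟨t - 1, by omega, ?_⟩
      apply pvNxt_inj grid w h hw hh _ _ (pvIter_lt grid w h hw hh s hs _) hm
      rw [← Function.iterate_succ_apply' (pvNxtOf grid w h)]
      have e : (t - 1).succ = t := by omega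
      rw [e]
      exact he
  · rintro ⟨t, ht, rfl⟩
    by_cases htp : t + 1 = p
    · exact ⟨0, hp, by rw [← Function.iterate_succ_apply' (pvNxtOf grid w h), Nat.succ_eq_add_one, htp, hret]; rfl⟩
    · exact ⟨t + 1, by omega, by rw [← Function.iterate_succ_apply' (pvNxtOf grid w h)]⟩

-- the loop bodies: A's, the ghost visited-array one, and B's cycle-leader one
def pvBodyA (grid : List String) (w h : Nat)
    (st : List (List (List Int)) × List Int) (u : Nat) :
    List (List (List Int)) × List Int :=
  if pvVal3 st.1 (pvYOf w u) (pvXOf w u) (pvIOf u) = 0 then st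
  else
    let r := pvWalkA grid (w : Int) (h : Int) (pvYOf w u : Int) (pvXOf w u : Int) (pvIOf u : Int)
      (4 * w * h) st.1 0 (pvYOf w u : Int) (pvXOf w u : Int) (pvIOf u : Int)
    (r.1, st.2 ++ [r.2])

def pvBodyV (w h : Nat) (nxt : List Nat)
    (st : List Bool × List Int) (u : Nat) : List Bool × List Int :=
  if st.1.getD u false then st
  else
    let r := pvFollow nxt u (4 * w * h) st.1 0 u
    (r.1, st.2 ++ [(r.2 : Int)])

def pvBodyL (grid : List String) (w h : Nat) (lengths : List Int) (s : Nat) : List Int :=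
  if (pvWalkB grid w h s (4 * w * h) 1 s (pvNxtOf grid w h s)).2 = s
  then lengths ++ [((pvWalkB grid w h s (4 * w * h) 1 s (pvNxtOf grid w h s)).1 : Int)]
  else lengths

theorem pvSim (grid : List String) (w h : Nat) (hw : 0 < w) (hh : 0 < h)
    (nxt : List Nat)
    (hnxt : ∀ u, u < 4 * w * h → nxt.getD u 0 = pvNxtOf grid w h u) :
    ∀ (L : List Nat) (P : List (List (List Int))) (v : List Bool) (ans : List Int),
      (∀ u ∈ L, u < 4 * w * h) → pvRel w h P v → pvClosed grid w h v →
      (L.foldl (pvBodyA grid w h) (P, ans)).2 = (L.foldl (pvBodyV w h nxt) (v, ans)).2 := by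
  intro L
  induction L with
  | nil => intro P v ans _ _ _; rfl
  | cons u L ih =>
    intro P v ans hmem hrel hcl
    obtain ⟨hS, hvlen, hval⟩ := hrel
    set F := pvNxtOf grid w h with hF
    have hu : u < 4 * w * h := hmem u (by simp)
    have hyu : pvYOf w u < h := pvYOf_lt w h u hu
    have hxu : pvXOf w u < w := pvXOf_lt w u hw
    have hiu : pvIOf u < 4 := pvIOf_lt u
    have hvalu : pvVal3 P (pvYOf w u) (pvXOf w u) (pvIOf u)
        = if v.getD u false then 0 else 1 := by
      rw [hval _ _ _ hyu hxu hiu, pvEnc_decode w u]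
    rw [List.foldl_cons, List.foldl_cons]
    by_cases hvis : v.getD u false
    · -- both skip
      have hA : pvBodyA grid w h (P, ans) u = (P, ans) := by
        unfold pvBodyA
        rw [if_pos (by rw [hvalu, if_pos hvis])]
      have hB : pvBodyV w h nxt (v, ans) u = (v, ans) := by
        unfold pvBodyV
        rw [if_pos hvis]
      rw [hA, hB]
      exact ih P v ans (fun x hx => hmem x (by simp [hx])) ⟨hS, hvlen, hval⟩ hcl
    · -- both walk the cycle of u
      have hvis' : v.getD u false = false := by simpa using hvis
      obtain ⟨p0, hp0pos, hp0le, hp0ret⟩ := pvReturn_exists grid w h hw hh u hu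
      have hex : ∃ p, 0 < p ∧ F^[p] u = u := ⟨p0, hp0pos, hp0ret⟩
      set p := Nat.find hex with hp
      obtain ⟨hppos, hpret⟩ := Nat.find_spec hex
      have hple : p ≤ 4 * w * h := le_trans (Nat.find_min' hex ⟨hp0pos, hp0ret⟩) hp0le
      have hmin : ∀ t, 0 < t → t < p → F^[t] u ≠ u := by
        intro t ht htp hcon
        exact absurd ⟨ht, hcon⟩ (Nat.find_min hex htp)
      set orb := (List.range p).map (fun t => F^[t] u) with horb
      have horbmem : ∀ m ∈ orb, m < 4 * w * h := by
        intro m hm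
        simp only [horb, List.mem_map, List.mem_range] at hm
        obtain ⟨t, _, rfl⟩ := hm
        exact pvIter_lt grid w h hw hh u hu t
      have horbnd : orb.Nodup := pvOrbit_nodup grid w h hw hh u p hu hmin
      -- A's walk
      have hA : pvBodyA grid w h (P, ans) u =
          (orb.foldl (fun P m => pvDec3N P (pvYOf w m) (pvXOf w m) (pvIOf m)) P,
            ans ++ [((p : Nat) : Int)]) := by
        unfold pvBodyA
        rw [if_neg (by rw [hvalu, if_neg hvis]; omega)]
        have := pvWalkA_spec grid w h hw hh u p hu hpret hmin (4 * w * h) 0 P 0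
          (by omega) (by omega)
        simp only [Function.iterate_zero_apply, Nat.sub_zero] at this
        rw [this]
        have e : List.map (fun t => (pvNxtOf grid w h)^[0 + t] u) (List.range p)
            = orb := by
          rw [horb]; simp only [Nat.zero_add]; rfl
        rw [e]
        norm_num
      -- the ghost walk
      have hB : pvBodyV w h nxt (v, ans) u =
          (orb.foldl (fun v m => v.set m true) v, ans ++ [((p : Nat) : Int)]) := by
        unfold pvBodyV
        rw [if_neg hvis]
        have := pvFollow_spec grid w h nxt u p hu hnxt hw hh hpret hmin (4 * w * h) 0 v 0
          (by omega) (by omega)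
        simp only [Function.iterate_zero_apply, Nat.sub_zero] at this
        rw [this]
        have e : List.map (fun t => (pvNxtOf grid w h)^[0 + t] u) (List.range p)
            = orb := by
          rw [horb]; simp only [Nat.zero_add]; rfl
        rw [e]
        norm_num
      rw [hA, hB]
      -- re-establish the invariants
      obtain ⟨hS', hval'⟩ := pvVal3_foldl_dec w h hw orb P horbmem horbnd hS
      have hvlen' : (orb.foldl (fun v m => v.set m true) v).length = 4 * w * h := by
        rw [(pvVisited_foldl orb v 0 (by omega)).2, hvlen]
      have hvval' : ∀ m, m < 4 * w * h →
          (orb.foldl (fun v m => v.set m true) v).getD m false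
            = if m ∈ orb then true else v.getD m false := by
        intro m hm
        exact (pvVisited_foldl orb v m (by omega)).1
      apply ih
      · intro x hx; exact hmem x (by simp [hx])
      · refine ⟨hS', hvlen', ?_⟩
        intro y x i hy hx hi
        have hee : pvEnc w y x i < 4 * w * h := pvEnc_lt w h y x i hy hx hi
        rw [hval' y x i hy hx hi, hvval' _ hee, hval _ _ _ hy hx hi]
        by_cases hin : pvEnc w y x i ∈ orb
        · rw [if_pos hin, if_pos hin]
          have : v.getD (pvEnc w y x i) false = false := by
            simp only [horb, List.mem_map, List.mem_range] at hin
            obtain ⟨t, _, he⟩ := hin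
            rw [← he]
            exact pvOrbit_unvisited grid w h hw hh v hcl u hu hvis' t
          rw [this]
          simp
        · rw [if_neg hin, if_neg hin]
          simp
      · intro m hm
        rw [hvval' _ hm, hvval' _ (pvNxtOf_lt grid w h hw hh m)]
        have hiff := pvOrbit_mem_iff grid w h hw hh u p hu hppos hpret m hm
        by_cases hin : m ∈ orb
        · rw [if_pos hin, if_pos (hiff.mpr hin)]
        · rw [if_neg hin, if_neg (fun hc => hin (hiff.mp hc))]
          exact hcl m hm

-- ===== ghost visited-array fold = B's cycle-leader fold =====
theorem pvSim2 (grid : List String) (w h : Nat) (hw : 0 < w) (hh : 0 < h)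
    (nxt : List Nat)
    (hnxt : ∀ u, u < 4 * w * h → nxt.getD u 0 = pvNxtOf grid w h u) :
    ∀ (m k : Nat) (v : List Bool) (ans : List Int), k + m = 4 * w * h →
      v.length = 4 * w * h →
      (∀ u, u < 4 * w * h → ((v.getD u false = true) ↔
        ∃ t, t < 4 * w * h ∧ (pvNxtOf grid w h)^[t] u < k)) →
      ((List.range' k m).foldl (pvBodyV w h nxt) (v, ans)).2
        = (List.range' k m).foldl (pvBodyL grid w h) ans := by
  intro m
  induction m with
  | zero => intro k v ans _ _ _; rfl
  | succ m ih =>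
    intro k v ans hk hvlen hinv
    have hkn : k < 4 * w * h := by omega
    rw [List.range'_succ, List.foldl_cons, List.foldl_cons]
    -- the minimal period of k
    obtain ⟨p0, hp0pos, hp0le, hp0ret⟩ := pvReturn_exists grid w h hw hh k hkn
    have hex : ∃ p, 0 < p ∧ (pvNxtOf grid w h)^[p] k = k := ⟨p0, hp0pos, hp0ret⟩
    set p := Nat.find hex with hp
    obtain ⟨hppos, hpret⟩ := Nat.find_spec hex
    have hple : p ≤ 4 * w * h := le_trans (Nat.find_min' hex ⟨hp0pos, hp0ret⟩) hp0le
    have hmin : ∀ t, 0 < t → t < p → (pvNxtOf grid w h)^[t] k ≠ k := by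
      intro t ht htp hcon
      exact absurd ⟨ht, hcon⟩ (Nat.find_min hex htp)
    -- B's walk result
    have hwalk := pvWalkB_spec grid w h k p hpret hmin (4 * w * h) 1 1 k
      (by omega) (by omega) (by omega)
    rw [Function.iterate_one] at hwalk
    by_cases hvk : v.getD k false
    · -- processed before: k's cycle has an element < k, so k is not its smallest
      obtain ⟨t, htn, htlt⟩ := (hinv k hkn).mp hvk
      have htr : (pvNxtOf grid w h)^[t % p] k < k := by
        rwa [pvIterate_mod (pvNxtOf grid w h) k p hpret t] at htlt
      have htp0 : 0 < t % p := by
        rcases Nat.eq_zero_or_pos (t % p) with h0 | h0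
        · rw [h0] at htr; simp at htr
        · exact h0
      have htpp : t % p < p := Nat.mod_lt _ (by omega)
      have hmem : (pvNxtOf grid w h)^[t % p] k
          ∈ (List.range (p - 1)).map (fun t => (pvNxtOf grid w h)^[1 + t] k) := by
        simp only [List.mem_map, List.mem_range]
        exact ⟨t % p - 1, by omega, by rw [show 1 + (t % p - 1) = t % p by omega]⟩
      have hsmall : ((List.range (p - 1)).map (fun t => (pvNxtOf grid w h)^[1 + t] k)).foldl
          (fun m a => if a < m then a else m) k ≠ k := by
        intro hc
        have := pvFoldMin_le_mem _ k _ hmem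
        omega
      have hL : pvBodyL grid w h ans k = ans := by
        unfold pvBodyL
        rw [hwalk]
        exact if_neg hsmall
      have hV : pvBodyV w h nxt (v, ans) k = (v, ans) := by
        unfold pvBodyV
        rw [if_pos hvk]
      rw [hL, hV]
      apply ih (k + 1) v ans (by omega) hvlen
      intro u hu
      rw [hinv u hu]
      constructor
      · rintro ⟨t', ht', hlt'⟩; exact ⟨t', ht', by omega⟩
      · rintro ⟨t', ht', hlt'⟩
        by_cases heq : (pvNxtOf grid w h)^[t'] u = k
        · -- u is in k's cycle, which already has an element < k
          obtain ⟨pu, hpupos, hpule, hpuret⟩ := pvReturn_exists grid w h hw hh u hu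
          refine ⟨(t + t') % pu, lt_of_lt_of_le (Nat.mod_lt _ (by omega)) hpule, ?_⟩
          rw [← pvIterate_mod (pvNxtOf grid w h) u pu hpuret,
            Function.iterate_add_apply, heq]
          exact htlt
        · exact ⟨t', ht', by omega⟩
    · -- k is the smallest state of its cycle: both record the cycle length p
      have hvk' : v.getD k false = false := by simpa using hvk
      have hnolow : ¬ ∃ t, t < 4 * w * h ∧ (pvNxtOf grid w h)^[t] k < k := by
        intro hc
        exact hvk ((hinv k hkn).mpr hc)
      have hV : pvBodyV w h nxt (v, ans) k =
          (((List.range p).map (fun t => (pvNxtOf grid w h)^[t] k)).foldl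
              (fun v m => v.set m true) v, ans ++ [((p : Nat) : Int)]) := by
        unfold pvBodyV
        rw [if_neg hvk]
        have := pvFollow_spec grid w h nxt k p hkn hnxt hw hh hpret hmin (4 * w * h) 0 v 0
          (by omega) (by omega)
        simp only [Function.iterate_zero_apply, Nat.sub_zero] at this
        rw [this]
        simp only [Nat.zero_add]
      have hsmall : ((List.range (p - 1)).map (fun t => (pvNxtOf grid w h)^[1 + t] k)).foldl
          (fun m a => if a < m then a else m) k = k := by
        rw [pvFoldMin_eq_iff]
        intro a ha
        simp only [List.mem_map, List.mem_range] at ha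
        obtain ⟨t, htlt, rfl⟩ := ha
        by_contra hlt
        exact hnolow ⟨1 + t, by omega, by omega⟩
      have hwp : pvWalkB grid w h k (4 * w * h) 1 k (pvNxtOf grid w h k) = (p, k) := by
        rw [hwalk, hsmall, show 1 + (p - 1) = p by omega]
      have hL : pvBodyL grid w h ans k = ans ++ [((p : Nat) : Int)] := by
        unfold pvBodyL
        rw [hwp]
        simp
      rw [hV, hL]
      -- re-establish the invariant after marking the whole cycle of k
      have hvlen' : ((((List.range p).map (fun t => (pvNxtOf grid w h)^[t] k)).foldl
          (fun v m => v.set m true) v)).length = 4 * w * h := by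
        rw [(pvVisited_foldl _ v 0 (by omega)).2, hvlen]
      apply ih (k + 1) _ _ (by omega) hvlen'
      intro u hu
      rw [(pvVisited_foldl _ v u (by omega)).1]
      constructor
      · intro htrue
        by_cases hin : u ∈ (List.range p).map (fun t => (pvNxtOf grid w h)^[t] k)
        · -- u is in k's cycle: some iterate of u equals k
          simp only [List.mem_map, List.mem_range] at hin
          obtain ⟨t, htlt, he⟩ := hin
          obtain ⟨t', ht'lt, ht'e⟩ := pvSameOrbit grid w h hw hh k u hkn t he
          exact ⟨t', ht'lt, by omega⟩
        · rw [if_neg hin] at htrue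
          obtain ⟨t, htn, htlt⟩ := (hinv u hu).mp htrue
          exact ⟨t, htn, by omega⟩
      · rintro ⟨t, htn, htlt⟩
        by_cases heq : (pvNxtOf grid w h)^[t] u = k
        · -- u is in k's cycle
          obtain ⟨t', ht'lt, ht'e⟩ := pvSameOrbit grid w h hw hh u k hu t heq
          have hin : u ∈ (List.range p).map (fun t => (pvNxtOf grid w h)^[t] k) := by
            simp only [List.mem_map, List.mem_range]
            refine ⟨t' % p, Nat.mod_lt _ (by omega), ?_⟩
            rw [← pvIterate_mod (pvNxtOf grid w h) k p hpret]
            exact ht'e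
          rw [if_pos hin]
        · have hlt2 : (pvNxtOf grid w h)^[t] u < k := by omega
          rw [(hinv u hu).mpr ⟨t, htn, hlt2⟩]
          split_ifs <;> rfl

-- ===== flattening A's nested loops into one loop over state ids =====
theorem pvFoldl_id {α σ : Type} (L : List α) (st : σ) :
    L.foldl (fun st _ => st) st = st := by
  induction L generalizing st with
  | nil => rfl
  | cons a L ih => simp only [List.foldl_cons]; exact ih st

theorem pvFoldl_pair {σ : Type} (g : σ → Nat → Nat → σ) (a b : Nat) (hb : 0 < b) :
    ∀ st : σ, (List.range a).foldl
        (fun st p => (List.range b).foldl (fun st q => g st p q) st) st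
      = (List.range (a * b)).foldl (fun st k => g st (k / b) (k % b)) st := by
  induction a with
  | zero => intro st; simp
  | succ a ih =>
    intro st
    rw [List.range_succ, List.foldl_append, ih]
    have e : (a + 1) * b = a * b + b := by ring
    rw [e, List.range_add, List.foldl_append, List.foldl_map]
    simp only [List.foldl_cons, List.foldl_nil]
    apply PySem.List.foldl_congr_mem
    intro acc q hq
    have hqb : q < b := List.mem_range.mp hq
    have h1 : (a * b + q) / b = a := by
      rw [Nat.mul_comm a b, Nat.mul_add_div hb, Nat.div_eq_of_lt hqb]
      omega
    have h2 : (a * b + q) % b = q := by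
      rw [Nat.mul_comm a b, Nat.mul_add_mod, Nat.mod_eq_of_lt hqb]
    rw [h1, h2]

theorem pvFlat_decode (w k : Nat) :
    k / (w * 4) = pvYOf w k ∧ k % (w * 4) / 4 = pvXOf w k ∧ k % (w * 4) % 4 = pvIOf k := by
  have hm : k % (4 * w) = k % 4 + 4 * (k / 4 % w) := Nat.mod_mul
  have hc : w * 4 = 4 * w := by ring
  refine ⟨?_, ?_, ?_⟩
  · rw [hc]; rfl
  · rw [hc]; unfold pvXOf; omega
  · rw [hc]; unfold pvIOf; omega

theorem pvFoldl_triple {σ : Type} (G : σ → Nat → Nat → Nat → σ) (a b : Nat) (hb : 0 < b)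
    (st : σ) :
    (List.range a).foldl
        (fun st y => (List.range b).foldl
          (fun st x => (List.range 4).foldl (fun st i => G st y x i) st) st) st
      = (List.range (a * (b * 4))).foldl
          (fun st k => G st (k / (b * 4)) (k % (b * 4) / 4) (k % (b * 4) % 4)) st := by
  have h1 : (List.range a).foldl
      (fun st y => (List.range b).foldl
        (fun st x => (List.range 4).foldl (fun st i => G st y x i) st) st) st
    = (List.range a).foldl
        (fun st y => (List.range (b * 4)).foldl
          (fun st m => G st y (m / 4) (m % 4)) st) st := by
    apply PySem.List.foldl_congr_mem
    intro acc y _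
    exact pvFoldl_pair (fun st x i => G st y x i) b 4 (by omega) acc
  rw [h1]
  exact pvFoldl_pair (fun st y m => G st y (m / 4) (m % 4)) a (b * 4) (by omega) st

theorem pvA_eq (g : String) (gs : List String) (hw : 0 < g.toList.length) :
    solution (g :: gs) = PySem.List.sorted
      (((List.range (4 * g.toList.length * (g :: gs).length)).foldl
          (pvBodyA (g :: gs) g.toList.length (g :: gs).length)
          (List.replicate (g :: gs).length
            (List.replicate g.toList.length ([1, 1, 1, 1] : List Int)), ([] : List Int))).2)
      (fun v => v) false := by
  unfold solution
  simp only [PySem.List.pyGet?_zero_cons, Option.getD_some, PySem.Str.len_eq,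
    PySem.List.len_eq, Int.toNat_natCast, PySem.List.pyRange_one, Int.sub_zero,
    zero_add, List.foldl_map, pvRead3_natCast]
  have h4 : Int.toNat 4 = 4 := rfl
  rw [h4]
  rw [pvFoldl_triple (G := fun st y x i =>
      if pvVal3 st.1 y x i = 0 then st
      else
        (((pvWalkA (g :: gs) (g.toList.length : Int) ((g :: gs).length : Int)
            (y : Int) (x : Int) (i : Int)
            (4 * g.toList.length * (g :: gs).length) st.1 0
            (y : Int) (x : Int) (i : Int))).1,
          st.2 ++ [((pvWalkA (g :: gs) (g.toList.length : Int) ((g :: gs).length : Int)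
            (y : Int) (x : Int) (i : Int)
            (4 * g.toList.length * (g :: gs).length) st.1 0
            (y : Int) (x : Int) (i : Int))).2]))
    (g :: gs).length g.toList.length (by omega)]
  have hlen : (g :: gs).length * (g.toList.length * 4) = 4 * g.toList.length * (g :: gs).length := by
    ring
  rw [hlen]
  refine congrArg (fun l => PySem.List.sorted l (fun v => v) false) ?_
  refine congrArg (fun r : (List (List (List Int)) × List Int) => r.2) ?_
  apply PySem.List.foldl_congr_mem
  intro acc k _
  obtain ⟨e1, e2, e3⟩ := pvFlat_decode g.toList.length k
  rw [e1, e2, e3]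
  rfl

theorem pvMainEq (g : String) (gs : List String) : solution (g :: gs) = solution_alt (g :: gs) := by
  by_cases hw : 0 < g.toList.length
  · have hh : 0 < (g :: gs).length := by simp
    have hnxt : ∀ u, u < 4 * g.toList.length * (g :: gs).length →
        ((List.range (4 * g.toList.length * (g :: gs).length)).map
            (pvNxtOf (g :: gs) g.toList.length (g :: gs).length)).getD u 0
          = pvNxtOf (g :: gs) g.toList.length (g :: gs).length u := by
      intro u hu
      exact PySem.List.getD_map_range _ _ _ _ hu
    have hB : solution_alt (g :: gs) = PySem.List.sorted
        ((List.range (4 * g.toList.length * (g :: gs).length)).foldl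
          (pvBodyL (g :: gs) g.toList.length (g :: gs).length) ([] : List Int))
        (fun v => v) false := by
      unfold solution_alt pvBodyL
      simp only [PySem.List.pyGet?_zero_cons, Option.getD_some]
    rw [pvA_eq g gs hw, hB]
    refine congrArg (fun l => PySem.List.sorted l (fun v => v) false) ?_
    have hAV := pvSim (g :: gs) g.toList.length (g :: gs).length hw hh _ hnxt
      (List.range (4 * g.toList.length * (g :: gs).length))
      (List.replicate (g :: gs).length (List.replicate g.toList.length ([1, 1, 1, 1] : List Int)))
      (List.replicate (4 * g.toList.length * (g :: gs).length) false) []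
      (fun u hu => List.mem_range.mp hu) ?_ ?_
    · rw [hAV]
      have hVL := pvSim2 (g :: gs) g.toList.length (g :: gs).length hw hh _ hnxt
        (4 * g.toList.length * (g :: gs).length) 0
        (List.replicate (4 * g.toList.length * (g :: gs).length) false) []
        (by omega) (by simp) ?_
      · rw [← List.range_eq_range'] at hVL
        exact hVL
      · intro u hu
        rw [List.getD_replicate _ hu]
        simp
    · refine ⟨⟨by simp, ?_⟩, by simp, ?_⟩
      · intro r hr
        have hr' := List.eq_of_mem_replicate hr
        subst hr'
        refine ⟨by simp, ?_⟩
        intro c hc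
        have hc' := List.eq_of_mem_replicate hc
        subst hc'
        rfl
      · intro y x i hy hx hi
        have he : pvEnc g.toList.length y x i < 4 * g.toList.length * (g :: gs).length :=
          pvEnc_lt _ _ _ _ _ hy hx hi
        unfold pvVal3
        rw [List.getD_replicate _ hy, List.getD_replicate _ hx, List.getD_replicate _ he]
        interval_cases i <;> rfl
    · intro u hu
      rw [List.getD_replicate _ hu,
        List.getD_replicate _ (pvNxtOf_lt (g :: gs) g.toList.length (g :: gs).length hw hh u)]
  · -- degenerate: empty rows, no states at all
    have hw0 : g.toList.length = 0 := by omega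
    have hA : solution (g :: gs) = PySem.List.sorted ([] : List Int) (fun v => v) false := by
      unfold solution
      simp only [PySem.List.pyGet?_zero_cons, Option.getD_some, PySem.Str.len_eq,
        PySem.List.len_eq, Int.toNat_natCast, PySem.List.pyRange_one, Int.sub_zero,
        zero_add, List.foldl_map, hw0, List.range_zero, List.foldl_nil]
      rw [pvFoldl_id]
    have hB : solution_alt (g :: gs) = PySem.List.sorted ([] : List Int) (fun v => v) false := by
      unfold solution_alt
      simp only [PySem.List.pyGet?_zero_cons, Option.getD_some, hw0, Nat.mul_zero,
        Nat.zero_mul, List.range_zero, List.foldl_nil]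
    rw [hA, hB]

-- ===== VERDICT (by name: the statement is the Claim_ definition above) =====
theorem solution_spec : Claim_equal_solution := by
  intro grid _ hpre
  obtain ⟨hne, _⟩ := hpre
  unfold Spec_solution
  cases grid with
  | nil => exact absurd rfl hne
  | cons g gs => exact pvMainEq g gs
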